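-- pv_equiv track=rewrite | github.com/JonathanGun/Competitive-Programming-Archive | kattis/piano.py | can_schedule
-- ===== SOURCE A (Python) =====
-- from collections import defaultdict
--
-- def is_weekday(day):
--     return (day - 1) % 7 < 5
--
-- def can_schedule(orders, capacity_per_day, use_weekends):
--     if not orders:
--         return True
--
--     orders = sorted(orders, key=lambda x: (x[1], x[0]))
--     day_usage = defaultdict(int)
--     for a, b in orders:
--         scheduled = False
--         for day in range(a, b + 1):
--             if not use_weekends and not is_weekday(day):
--                 continue
--             if day_usage[day] < capacity_per_day:
--                 day_usage[day] += 1
--                 scheduled = True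
--                 break
--         if not scheduled:
--             return False
--     return True
-- ===== SOURCE B (Python) =====
-- def can_schedule(orders, capacity_per_day, use_weekends):
--     if not orders:
--         return True
--     if capacity_per_day <= 0:
--         return False
--
--     def next_valid(d):
--         # smallest usable day >= d (skip Sat/Sun when weekends are off)
--         if use_weekends:
--             return d
--         r = (d - 1) % 7
--         return d if r < 5 else d + (7 - r)
--
--     parent = {}   # full day -> candidate for the next free usable day (union-find)
--     count = {}
--
--     def find(d):
--         path = []
--         while d in parent:
--             path.append(d)
--             d = parent[d]
--         for p in path:          # path compression
--             parent[p] = d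
--         return d
--
--     for a, b in sorted(orders, key=lambda x: (x[1], x[0])):
--         day = find(next_valid(a))
--         if day > b:
--             return False
--         c = count.get(day, 0) + 1
--         count[day] = c
--         if c >= capacity_per_day:
--             parent[day] = find(next_valid(day + 1))
--     return True
-- ===== Notes on version B (the rewrite author's own statement) =====
-- stated objective: faster
-- what changed: Replaces A's per-order linear scan over every day of the interval (re-examining full days and weekends each time) with a union-find 'next free usable day' pointer with path compression, plus an arithmetic weekend skip and an up-front capacity<=0 rejection.
import Mathlib
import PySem

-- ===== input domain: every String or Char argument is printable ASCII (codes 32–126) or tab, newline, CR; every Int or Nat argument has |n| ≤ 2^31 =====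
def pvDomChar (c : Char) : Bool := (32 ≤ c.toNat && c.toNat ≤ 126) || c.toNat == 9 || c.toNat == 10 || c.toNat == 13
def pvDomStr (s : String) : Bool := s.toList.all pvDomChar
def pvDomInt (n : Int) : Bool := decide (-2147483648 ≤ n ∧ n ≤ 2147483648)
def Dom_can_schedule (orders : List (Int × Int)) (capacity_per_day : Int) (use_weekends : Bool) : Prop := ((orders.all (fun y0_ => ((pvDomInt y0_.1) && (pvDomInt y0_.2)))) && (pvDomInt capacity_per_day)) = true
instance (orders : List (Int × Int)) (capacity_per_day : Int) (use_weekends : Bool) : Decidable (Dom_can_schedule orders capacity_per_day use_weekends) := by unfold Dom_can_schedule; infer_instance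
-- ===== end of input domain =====

-- B replaces A's day-by-day scan of each interval with a union-find "next free usable day"
-- pointer (path compression) and an arithmetic weekend skip; objective: faster.

-- ===== PORT A =====
def is_weekday (day : Int) : Bool := decide (PySem.Int.mod (day - 1) 7 < 5)

-- inner 'for day in range(a, b+1)' loop: some updated usage dict on break, none if never scheduled
-- (defaultdict read day_usage[day] is modeled by getD _ 0; the implicit zero-entry insertion
--  changes no later lookup and not the Bool result)
def aScan (use_weekends : Bool) (cap : Int) : List Int → PySem.Dict Int Int → Option (PySem.Dict Int Int)
  | [], _ => none
  | day :: rest, u =>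
    if !use_weekends && !is_weekday day then aScan use_weekends cap rest u
    else if u.getD day 0 < cap then some (u.insert day (u.getD day 0 + 1))
    else aScan use_weekends cap rest u

def aLoop (use_weekends : Bool) (cap : Int) : List (Int × Int) → PySem.Dict Int Int → Bool
  | [], _ => true
  | (a, b) :: rest, u =>
    match aScan use_weekends cap (PySem.List.pyRange a (b + 1) 1) u with
    | none => false
    | some u' => aLoop use_weekends cap rest u'

def can_schedule (orders : List (Int × Int)) (capacity_per_day : Int) (use_weekends : Bool) : Bool :=
  if orders = [] then true
  else aLoop use_weekends capacity_per_day
         (PySem.List.sorted2 orders (fun x => x.2) (fun x => x.1)) PySem.Dict.empty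

-- ===== PORT B =====
def next_valid (use_weekends : Bool) (d : Int) : Int :=
  if use_weekends then d
  else
    let r := PySem.Int.mod (d - 1) 7
    if r < 5 then d else d + (7 - r)

-- 'while d in parent: path.append(d); d = parent[d]' — fuel = size + 1 suffices since
-- every stored pointer is strictly increasing (proved below); returns (root, visited path)
def bWalk : Nat → PySem.Dict Int Int → Int → Int × List Int
  | 0, _, d => (d, [])
  | fuel + 1, parent, d =>
    match parent.get? d with
    | none => (d, [])
    | some p =>
      let rp := bWalk fuel parent p
      (rp.1, d :: rp.2)

-- find with path compression: returns (root, updated parent map)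
def bFind (parent : PySem.Dict Int Int) (d : Int) : Int × PySem.Dict Int Int :=
  let rp := bWalk (parent.size + 1) parent d
  (rp.1, rp.2.foldl (fun pr p => pr.insert p rp.1) parent)

def bLoop (use_weekends : Bool) (cap : Int) :
    List (Int × Int) → PySem.Dict Int Int → PySem.Dict Int Int → Bool
  | [], _, _ => true
  | (a, b) :: rest, parent, count =>
    let fr := bFind parent (next_valid use_weekends a)
    if fr.1 > b then false
    else
      let c := count.getD fr.1 0 + 1
      let count' := count.insert fr.1 c
      if cap ≤ c then
        let fr2 := bFind fr.2 (next_valid use_weekends (fr.1 + 1))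
        bLoop use_weekends cap rest (fr2.2.insert fr.1 fr2.1) count'
      else bLoop use_weekends cap rest fr.2 count'

def can_schedule_alt (orders : List (Int × Int)) (capacity_per_day : Int) (use_weekends : Bool) : Bool :=
  if orders = [] then true
  else if capacity_per_day ≤ 0 then false
  else bLoop use_weekends capacity_per_day
         (PySem.List.sorted2 orders (fun x => x.2) (fun x => x.1))
         PySem.Dict.empty PySem.Dict.empty

-- ===== PRECONDITION & SPEC =====
def Spec_can_schedule (orders : List (Int × Int)) (capacity_per_day : Int) (use_weekends : Bool) (out : Bool) : Prop := out = can_schedule_alt orders capacity_per_day use_weekends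
instance (orders : List (Int × Int)) (capacity_per_day : Int) (use_weekends : Bool) (out : Bool) : Decidable (Spec_can_schedule orders capacity_per_day use_weekends out) := by unfold Spec_can_schedule; infer_instance

-- ===== CLAIM (what is proved, stated in full; the proofs are below) =====
def Claim_equal_can_schedule : Prop := ∀ (orders : List (Int × Int)) (capacity_per_day : Int) (use_weekends : Bool), Dom_can_schedule orders capacity_per_day use_weekends → Spec_can_schedule orders capacity_per_day use_weekends (can_schedule orders capacity_per_day use_weekends)

-- ===== LEMMAS AND PROOFS =====
-- a usable (valid) day
def validB (w : Bool) (d : Int) : Bool := w || is_weekday d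

-- a day on which one more order can be scheduled under usage u
def availP (u : PySem.Dict Int Int) (cap : Int) (w : Bool) (e : Int) : Prop :=
  validB w e = true ∧ u.getD e 0 < cap

-- what one stored parent pointer d ↦ p means
def EntryP (u : PySem.Dict Int Int) (cap : Int) (w : Bool) (d p : Int) : Prop :=
  d < p ∧ validB w p = true ∧ ∀ e, d ≤ e → e < p → ¬ availP u cap w e

-- the union-find invariant relative to A's usage dict u
def InvUF (parent u : PySem.Dict Int Int) (cap : Int) (w : Bool) : Prop :=
  (∀ d p, parent.get? d = some p → EntryP u cap w d p) ∧
  (∀ d, cap ≤ u.getD d 0 → (parent.get? d).isSome = true)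

-- ---- next_valid facts ----

lemma next_valid_eq_false (d : Int) :
    next_valid false d =
      if PySem.Int.mod (d - 1) 7 < 5 then d else d + (7 - PySem.Int.mod (d - 1) 7) := rfl

lemma next_valid_le (w : Bool) (d : Int) : d ≤ next_valid w d := by
  cases w with
  | true => simp [next_valid]
  | false =>
    have h0 : 0 ≤ PySem.Int.mod (d - 1) 7 := PySem.Int.mod_nonneg _ (by norm_num)
    have h7 : PySem.Int.mod (d - 1) 7 < 7 := PySem.Int.mod_lt _ (by norm_num)
    rw [next_valid_eq_false]
    split_ifs <;> omega

lemma next_valid_valid (w : Bool) (d : Int) : validB w (next_valid w d) = true := by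
  cases w with
  | true => rfl
  | false =>
    have hm : PySem.Int.mod (d - 1) 7 = (d - 1) % 7 :=
      PySem.Int.mod_eq_emod_of_pos (by norm_num : (0:Int) < 7)
    simp only [validB, Bool.false_or, is_weekday, next_valid_eq_false]
    split_ifs with h
    · simpa using h
    · rw [decide_eq_true_eq,
        PySem.Int.mod_eq_emod_of_pos (by norm_num : (0:Int) < 7)]
      rw [hm] at h ⊢
      omega

lemma next_valid_gap (w : Bool) (d e : Int) (h1 : d ≤ e) (h2 : e < next_valid w d) :
    validB w e = false := by
  cases w with
  | true =>
    exfalso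
    rw [show next_valid true d = d from rfl] at h2
    omega
  | false =>
    have hm : PySem.Int.mod (d - 1) 7 = (d - 1) % 7 :=
      PySem.Int.mod_eq_emod_of_pos (by norm_num : (0:Int) < 7)
    rw [next_valid_eq_false] at h2
    simp only [validB, Bool.false_or, is_weekday]
    rw [PySem.Int.mod_eq_emod_of_pos (by norm_num : (0:Int) < 7)]
    simp only [decide_eq_false_iff_not, not_lt]
    split_ifs at h2 with h
    · omega
    · rw [hm] at h2 h
      omega

-- availability only shrinks when usage grows at one day
lemma not_avail_insert {u : PySem.Dict Int Int} {cap : Int} {w : Bool} {r v e : Int}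
    (hv : u.getD r 0 ≤ v) (h : ¬ availP u cap w e) : ¬ availP (u.insert r v) cap w e := by
  unfold availP at *
  rw [PySem.Dict.getD_insert]
  split_ifs with he
  · subst he
    rintro ⟨hval, hlt⟩
    exact h ⟨hval, by omega⟩
  · exact h

-- ---- the strictly-decreasing fuel measure for bWalk ----

lemma filter_len_lt {l : List (Int × Int)} {d p v : Int}
    (hmem : (d, v) ∈ l) (hdp : d < p) :
    (l.filter (fun q => decide (p ≤ q.1))).length < (l.filter (fun q => decide (d ≤ q.1))).length := by
  induction l with
  | nil => simp at hmem
  | cons x t ih =>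
    have hsub : (t.filter (fun q => decide (p ≤ q.1))).length ≤
        (t.filter (fun q => decide (d ≤ q.1))).length :=
      (List.monotone_filter_right t
        (by intro q hq; simp only [decide_eq_true_eq] at *; omega)).length_le
    rcases List.mem_cons.mp hmem with hx | ht
    · subst hx
      rw [List.filter_cons_of_neg
            (by show ¬decide (p ≤ d) = true; simp only [decide_eq_true_eq]; omega),
          List.filter_cons_of_pos
            (by show decide (d ≤ d) = true; simp)]
      simp only [List.length_cons]
      omega
    · have ht2 := ih ht
      by_cases hp : p ≤ x.1
      · rw [List.filter_cons_of_pos (by exact (decide_eq_true hp)),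
            List.filter_cons_of_pos (by exact (decide_eq_true (show d ≤ x.1 by omega)))]
        simp only [List.length_cons]
        omega
      · rw [List.filter_cons_of_neg (by simpa using hp)]
        by_cases hd2 : d ≤ x.1
        · rw [List.filter_cons_of_pos (by exact (decide_eq_true hd2))]
          simp only [List.length_cons]
          omega
        · rw [List.filter_cons_of_neg (by simpa using hd2)]
          omega

-- ---- walk specification ----

lemma bWalk_spec {u : PySem.Dict Int Int} {cap : Int} {w : Bool} {parent : PySem.Dict Int Int}
    (hE : ∀ d p, parent.get? d = some p → EntryP u cap w d p) :
    ∀ fuel d, (parent.items.filter (fun q => decide (d ≤ q.1))).length < fuel →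
    parent.get? (bWalk fuel parent d).1 = none ∧
    d ≤ (bWalk fuel parent d).1 ∧
    (∀ e, d ≤ e → e < (bWalk fuel parent d).1 → ¬ availP u cap w e) ∧
    ((bWalk fuel parent d).1 ≠ d → validB w (bWalk fuel parent d).1 = true) ∧
    (∀ p ∈ (bWalk fuel parent d).2,
       p < (bWalk fuel parent d).1 ∧
       (∀ e, p ≤ e → e < (bWalk fuel parent d).1 → ¬ availP u cap w e) ∧
       validB w (bWalk fuel parent d).1 = true) := by
  intro fuel
  induction fuel with
  | zero => intro d h; exact absurd h (by omega)
  | succ fuel ih =>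
    intro d hlen
    cases hg : parent.get? d with
    | none =>
      have heq : bWalk (fuel + 1) parent d = (d, []) := by simp [bWalk, hg]
      rw [heq]
      dsimp only
      refine ⟨hg, le_refl d, ?_, ?_, ?_⟩
      · intro e h1 h2; omega
      · intro h; exact absurd rfl h
      · intro p hp; simp at hp
    | some p =>
      obtain ⟨hdp, hvp, hgap⟩ := hE d p hg
      have hmem := PySem.Dict.mem_items_of_get?_eq_some parent hg
      have hdec := filter_len_lt hmem hdp
      obtain ⟨h1, h2, h3, h4, h5⟩ := ih p (by omega)
      have heq : bWalk (fuel + 1) parent d =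
          ((bWalk fuel parent p).1, d :: (bWalk fuel parent p).2) := by
        simp [bWalk, hg]
      rw [heq]
      dsimp only
      have hvr : validB w (bWalk fuel parent p).1 = true := by
        by_cases hrp : (bWalk fuel parent p).1 = p
        · rw [hrp]; exact hvp
        · exact h4 hrp
      have hgapdr : ∀ e, d ≤ e → e < (bWalk fuel parent p).1 → ¬ availP u cap w e := by
        intro e he1 he2
        by_cases hep : e < p
        · exact hgap e he1 hep
        · exact h3 e (by omega) he2
      refine ⟨h1, by omega, hgapdr, fun _ => hvr, ?_⟩
      intro q hq
      rcases List.mem_cons.mp hq with hqd | hqt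
      · subst hqd
        exact ⟨by omega, hgapdr, hvr⟩
      · exact h5 q hqt

-- lookups after the path-compression writes
lemma get?_foldl_insert_const (r : Int) :
    ∀ (path : List Int) (parent : PySem.Dict Int Int) (x : Int),
    (path.foldl (fun pr p => pr.insert p r) parent).get? x =
      if x ∈ path then some r else parent.get? x := by
  intro path
  induction path with
  | nil => intro parent x; simp
  | cons p t ih =>
    intro parent x
    simp only [List.foldl_cons, ih, List.mem_cons]
    by_cases hxt : x ∈ t
    · simp [hxt]
    · by_cases hxp : x = p
      · subst hxp
        simp [hxt, PySem.Dict.get?_insert_self]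
      · simp [hxt, hxp, PySem.Dict.get?_insert_of_ne _ _ hxp]

-- ---- find specification ----

lemma bFind_spec {u : PySem.Dict Int Int} {cap : Int} {w : Bool} {parent : PySem.Dict Int Int}
    (hinv : InvUF parent u cap w) (d : Int) :
    d ≤ (bFind parent d).1 ∧
    ((bFind parent d).1 ≠ d → validB w (bFind parent d).1 = true) ∧
    (∀ e, d ≤ e → e < (bFind parent d).1 → ¬ availP u cap w e) ∧
    u.getD (bFind parent d).1 0 < cap ∧
    InvUF (bFind parent d).2 u cap w ∧
    ((bFind parent d).2.get? (bFind parent d).1 = none) := by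
  obtain ⟨hE, hFull⟩ := hinv
  have hfuel : (parent.items.filter (fun q => decide (d ≤ q.1))).length < parent.size + 1 := by
    have h := List.length_filter_le (fun q => decide (d ≤ q.1)) parent.items
    have hsz : parent.size = parent.items.length := rfl
    omega
  obtain ⟨hnone, hle, hgap, hval, hpath⟩ := bWalk_spec hE (parent.size + 1) d hfuel
  have hfind : bFind parent d =
      ((bWalk (parent.size + 1) parent d).1,
       (bWalk (parent.size + 1) parent d).2.foldl
         (fun pr p => pr.insert p (bWalk (parent.size + 1) parent d).1) parent) := rfl
  rw [hfind]
  dsimp only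
  set r := (bWalk (parent.size + 1) parent d).1 with hr
  set path := (bWalk (parent.size + 1) parent d).2 with hpth
  have hget : ∀ x, (path.foldl (fun pr p => pr.insert p r) parent).get? x =
      if x ∈ path then some r else parent.get? x :=
    fun x => get?_foldl_insert_const r path parent x
  have hrnot : r ∉ path := by
    intro hmem
    have := (hpath r hmem).1
    omega
  have hucap : u.getD r 0 < cap := by
    by_contra hcap
    have hs := hFull r (by omega)
    rw [hnone] at hs
    simp at hs
  refine ⟨hle, hval, hgap, hucap, ⟨?_, ?_⟩, ?_⟩
  · intro d' p' hgp
    rw [hget d'] at hgp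
    by_cases hd' : d' ∈ path
    · rw [if_pos hd'] at hgp
      obtain ⟨hplt, hpgap, hpval⟩ := hpath d' hd'
      injection hgp with hgp
      subst hgp
      exact ⟨hplt, hpval, hpgap⟩
    · rw [if_neg hd'] at hgp
      exact hE d' p' hgp
  · intro d' hcap'
    rw [hget d']
    by_cases hd' : d' ∈ path
    · simp [hd']
    · rw [if_neg hd']
      exact hFull d' hcap'
  · rw [hget r, if_neg hrnot]
    exact hnone

-- ---- A's inner scan finds exactly the first available day ----

lemma aScan_cons (w : Bool) (cap : Int) (a : Int) (rest : List Int) (u : PySem.Dict Int Int) :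
    aScan w cap (a :: rest) u =
      if (!w && !is_weekday a) = true then aScan w cap rest u
      else if u.getD a 0 < cap then some (u.insert a (u.getD a 0 + 1))
      else aScan w cap rest u := rfl

lemma aScan_spec {w : Bool} {cap : Int} {u : PySem.Dict Int Int} {f : Int}
    (hvf : validB w f = true) (hlt : u.getD f 0 < cap) :
    ∀ n a b, (b + 1 - a).toNat = n → a ≤ f → (∀ e, a ≤ e → e < f → ¬ availP u cap w e) →
    aScan w cap (PySem.List.pyRange a (b + 1) 1) u =
      if f ≤ b then some (u.insert f (u.getD f 0 + 1)) else none := by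
  intro n
  induction n with
  | zero =>
    intro a b hn haf _
    have hba : b + 1 ≤ a := by omega
    rw [PySem.List.pyRange_one_eq_nil hba, if_neg (by omega)]
    rfl
  | succ n ih =>
    intro a b hn haf hgap
    have hab : a < b + 1 := by omega
    rw [PySem.List.pyRange_one_cons hab, aScan_cons]
    by_cases haf' : a = f
    · have hskip : ¬ ((!w && !is_weekday a) = true) := by
        subst haf'
        unfold validB at hvf
        cases w with
        | true => simp
        | false => simp only [Bool.false_or] at hvf; simp [hvf]
      rw [if_neg hskip]
      subst haf'
      rw [if_pos hlt, if_pos (by omega)]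
    · have halt : a < f := by omega
      have hna : ¬ availP u cap w a := hgap a (le_refl a) halt
      have hrec : aScan w cap (PySem.List.pyRange (a + 1) (b + 1) 1) u =
          if f ≤ b then some (u.insert f (u.getD f 0 + 1)) else none :=
        ih (a + 1) b (by omega) (by omega) (fun e he1 he2 => hgap e (by omega) he2)
      by_cases hskip : (!w && !is_weekday a) = true
      · rw [if_pos hskip]
        exact hrec
      · rw [if_neg hskip]
        have hvala : validB w a = true := by
          unfold validB
          cases w with
          | true => rfl
          | false =>
            simp only [Bool.false_or]
            by_contra hcon
            apply hskip
            simp only [Bool.not_eq_true] at hcon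
            simp [hcon]
        rw [if_neg (fun hc => hna ⟨hvala, hc⟩)]
        exact hrec

-- ---- the main loop correspondence ----

lemma aLoop_cons (w : Bool) (cap a b : Int) (rest : List (Int × Int)) (u : PySem.Dict Int Int) :
    aLoop w cap ((a, b) :: rest) u =
      match aScan w cap (PySem.List.pyRange a (b + 1) 1) u with
      | none => false
      | some u' => aLoop w cap rest u' := rfl

lemma loop_eq (w : Bool) (cap : Int) :
    ∀ (l : List (Int × Int)) (u parent count : PySem.Dict Int Int),
    InvUF parent u cap w → (∀ d, count.getD d 0 = u.getD d 0) →
    aLoop w cap l u = bLoop w cap l parent count := by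
  intro l
  induction l with
  | nil => intro u parent count _ _; rfl
  | cons hd rest ih =>
    rcases hd with ⟨a, b⟩
    intro u parent count hinv hrel
    have hbeq : bLoop w cap ((a, b) :: rest) parent count =
        (if (bFind parent (next_valid w a)).1 > b then false
         else
           if cap ≤ count.getD (bFind parent (next_valid w a)).1 0 + 1 then
             bLoop w cap rest
               ((bFind (bFind parent (next_valid w a)).2
                   (next_valid w ((bFind parent (next_valid w a)).1 + 1))).2.insert
                  (bFind parent (next_valid w a)).1
                  (bFind (bFind parent (next_valid w a)).2
                     (next_valid w ((bFind parent (next_valid w a)).1 + 1))).1)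
               (count.insert (bFind parent (next_valid w a)).1
                  (count.getD (bFind parent (next_valid w a)).1 0 + 1))
           else
             bLoop w cap rest (bFind parent (next_valid w a)).2
               (count.insert (bFind parent (next_valid w a)).1
                  (count.getD (bFind parent (next_valid w a)).1 0 + 1))) := rfl
    have hfs := bFind_spec hinv (next_valid w a)
    set r := (bFind parent (next_valid w a)).1 with hrdef
    set parent1 := (bFind parent (next_valid w a)).2 with hp1def
    obtain ⟨hxr, hvalr, hgapxr, hucap, hinv1, hnone1⟩ := hfs
    have hvr : validB w r = true := by
      by_cases h : r = next_valid w a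
      · rw [h]; exact next_valid_valid w a
      · exact hvalr h
    have har : a ≤ r := le_trans (next_valid_le w a) hxr
    have hgapar : ∀ e, a ≤ e → e < r → ¬ availP u cap w e := by
      intro e he1 he2
      by_cases hex : e < next_valid w a
      · rintro ⟨hv, _⟩
        rw [next_valid_gap w a e he1 hex] at hv
        exact absurd hv (by decide)
      · exact hgapxr e (by omega) he2
    have hscan := aScan_spec hvr hucap ((b + 1 - a).toNat) a b rfl har hgapar
    rw [aLoop_cons, hscan, hbeq]
    by_cases hrb : r ≤ b
    · rw [if_pos hrb, if_neg (by omega)]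
      have hcnt : count.getD r 0 = u.getD r 0 := hrel r
      have hrel' : ∀ d, (count.insert r (count.getD r 0 + 1)).getD d 0 =
          (u.insert r (u.getD r 0 + 1)).getD d 0 := by
        intro d
        rw [PySem.Dict.getD_insert, PySem.Dict.getD_insert]
        split_ifs with hdr
        · rw [hcnt]
        · exact hrel d
      have hmono : ∀ e, ¬ availP u cap w e → ¬ availP (u.insert r (u.getD r 0 + 1)) cap w e :=
        fun e he => not_avail_insert (by omega) he
      by_cases hfullc : cap ≤ count.getD r 0 + 1
      · rw [if_pos hfullc]
        have hfs2 := bFind_spec hinv1 (next_valid w (r + 1))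
        set r2 := (bFind parent1 (next_valid w (r + 1))).1 with hr2def
        set parent2 := (bFind parent1 (next_valid w (r + 1))).2 with hp2def
        obtain ⟨hxr2, hvalr2, hgap2, hucap2, hinv2, hnone2⟩ := hfs2
        have hvr2 : validB w r2 = true := by
          by_cases h : r2 = next_valid w (r + 1)
          · rw [h]; exact next_valid_valid w (r + 1)
          · exact hvalr2 h
        have hr1r2 : r + 1 ≤ r2 := le_trans (next_valid_le w (r + 1)) hxr2
        obtain ⟨hE2, hFull2⟩ := hinv2
        have hinv3 : InvUF (parent2.insert r r2) (u.insert r (u.getD r 0 + 1)) cap w := by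
          constructor
          · intro d p hgp
            rw [PySem.Dict.get?_insert] at hgp
            split_ifs at hgp with hdr
            · subst hdr
              injection hgp with hgp
              subst hgp
              refine ⟨by omega, hvr2, ?_⟩
              intro e he1 he2
              by_cases her : e = r
              · subst her
                rintro ⟨_, hlt'⟩
                rw [PySem.Dict.getD_insert, if_pos rfl] at hlt'
                omega
              · by_cases hex2 : e < next_valid w (r + 1)
                · rintro ⟨hv, _⟩
                  rw [next_valid_gap w (r + 1) e (by omega) hex2] at hv
                  exact absurd hv (by decide)
                · exact hmono e (hgap2 e (by omega) he2)
            · obtain ⟨hh1, hh2, hh3⟩ := hE2 d p hgp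
              exact ⟨hh1, hh2, fun e he1 he2 => hmono e (hh3 e he1 he2)⟩
          · intro d hcd
            rw [PySem.Dict.get?_insert]
            split_ifs with hdr
            · simp
            · apply hFull2
              rw [PySem.Dict.getD_insert, if_neg hdr] at hcd
              exact hcd
        exact ih (u.insert r (u.getD r 0 + 1)) (parent2.insert r r2)
          (count.insert r (count.getD r 0 + 1)) hinv3 hrel'
      · rw [if_neg hfullc]
        obtain ⟨hE1, hFull1⟩ := hinv1
        have hinv1' : InvUF parent1 (u.insert r (u.getD r 0 + 1)) cap w := by
          constructor
          · intro d p hgp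
            obtain ⟨hh1, hh2, hh3⟩ := hE1 d p hgp
            exact ⟨hh1, hh2, fun e he1 he2 => hmono e (hh3 e he1 he2)⟩
          · intro d hcd
            by_cases hdr : d = r
            · subst hdr
              rw [PySem.Dict.getD_insert, if_pos rfl] at hcd
              rw [hcnt] at hfullc
              omega
            · apply hFull1
              rw [PySem.Dict.getD_insert, if_neg hdr] at hcd
              exact hcd
        exact ih (u.insert r (u.getD r 0 + 1)) parent1
          (count.insert r (count.getD r 0 + 1)) hinv1' hrel'
    · rw [if_neg hrb, if_pos (by omega)]

-- with capacity ≤ 0 A's very first scan never schedules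
lemma aScan_empty_nonpos {w : Bool} {cap : Int} (hcap : cap ≤ 0) :
    ∀ days : List Int, aScan w cap days PySem.Dict.empty = none := by
  intro days
  induction days with
  | nil => rfl
  | cons d rest ih =>
    rw [aScan_cons]
    split_ifs with h1 h2
    · exact ih
    · rw [PySem.Dict.getD_empty] at h2; omega
    · exact ih

lemma inv_empty {cap : Int} {w : Bool} (hcap : 0 < cap) :
    InvUF PySem.Dict.empty PySem.Dict.empty cap w := by
  constructor
  · intro d p hgp
    rw [PySem.Dict.get?_empty] at hgp
    simp at hgp
  · intro d hcd
    rw [PySem.Dict.getD_empty] at hcd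
    omega

-- ===== VERDICT (by name: the statement is the Claim_ definition above) =====
theorem can_schedule_spec : Claim_equal_can_schedule := by
  unfold Claim_equal_can_schedule
  intro orders cap w _
  unfold Spec_can_schedule can_schedule can_schedule_alt
  by_cases h0 : orders = []
  · rw [if_pos h0, if_pos h0]
  · rw [if_neg h0, if_neg h0]
    by_cases hc : cap ≤ 0
    · rw [if_pos hc]
      have hne : PySem.List.sorted2 orders (fun x => x.2) (fun x => x.1) ≠ [] := by
        intro hnil
        have hperm := PySem.List.sorted2_perm orders (fun x => x.2) (fun x => x.1) false
        rw [hnil] at hperm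
        exact h0 hperm.nil_eq.symm
      rcases hl : PySem.List.sorted2 orders (fun x => x.2) (fun x => x.1) with _ | ⟨⟨a, b⟩, rest⟩
      · exact absurd hl hne
      · rw [aLoop_cons, aScan_empty_nonpos hc]
    · rw [if_neg hc]
      exact loop_eq w cap _ PySem.Dict.empty PySem.Dict.empty PySem.Dict.empty
        (inv_empty (by omega)) (fun d => rfl)
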